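-- pv_equiv track=rewrite | github.com/AmbiqAI/nnse | python/nnsp_pack/log_module.py | norm_oneTwo
-- ===== SOURCE A (Python) =====
-- def norm_oneTwo(x):
--     one = 1
--     shift = 0
--     for i in range(31):
--         idx = one << (30 - i)
--         if (idx & x):
--             shift = -(30 - i - 15)
--             break
--     if shift > 0:
--         y = x << shift
--     else:
--         y = x >> -shift
--     shift = -shift
--     return y, shift
-- ===== SOURCE B (Python) =====
-- def norm_oneTwo(x):
--     # Closed form: highest set bit among the low 31 bits via mod + bit_length,
--     # instead of A's 31-step scan loop.
--     low = x % (1 << 31)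
--     if low == 0:
--         return x, 0
--     shift = low.bit_length() - 16
--     y = x >> shift if shift > 0 else x << -shift
--     return y, shift
-- ===== Notes on version B (the rewrite author's own statement) =====
-- stated objective: simpler
-- what changed: Replaces A's per-bit most-significant-bit scan loop with a closed form: reduce x modulo the examined bit range and read the MSB position directly off bit_length(), then apply one shift.
import Mathlib
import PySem

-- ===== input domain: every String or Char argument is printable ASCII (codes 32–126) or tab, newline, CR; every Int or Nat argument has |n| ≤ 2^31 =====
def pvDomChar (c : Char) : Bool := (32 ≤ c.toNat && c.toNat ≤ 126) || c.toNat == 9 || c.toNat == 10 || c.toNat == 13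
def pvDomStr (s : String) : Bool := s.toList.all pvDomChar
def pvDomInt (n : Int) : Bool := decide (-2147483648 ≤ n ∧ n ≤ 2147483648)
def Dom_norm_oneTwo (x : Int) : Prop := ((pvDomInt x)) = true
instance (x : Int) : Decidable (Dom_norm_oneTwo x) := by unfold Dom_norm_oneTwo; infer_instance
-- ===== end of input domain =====

-- B computes the MSB position in closed form (mod + bit_length) instead of A's per-bit scan loop; objective: simpler.

-- ===== PORT A =====
-- the `for i in range(31): … break` scan; returns the value of `shift` after the loop
def normScanA (x : Int) (i : Nat) : Int :=
  if _h : i < 31 then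
    -- idx = one << (30 - i); if (idx & x): shift = -(30 - i - 15); break
    if PySem.Int.band ((1 : Int) <<< (30 - i)) x ≠ 0 then -((30 - (i : Int)) - 15)
    else normScanA x (i + 1)
  else 0
termination_by 31 - i

def norm_oneTwo (x : Int) : Int × Int :=
  let shift := normScanA x 0
  let y := if shift > 0 then x <<< shift.toNat else x >>> (-shift).toNat
  (y, -shift)

-- ===== PORT B =====
def norm_oneTwo_alt (x : Int) : Int × Int :=
  let low := PySem.Int.mod x ((1 : Int) <<< (31 : Nat))
  if low = 0 then (x, 0)
  else
    let shift := (PySem.Int.bitLength low : Int) - 16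
    let y := if shift > 0 then x >>> shift.toNat else x <<< (-shift).toNat
    (y, shift)

-- ===== PRECONDITION & SPEC =====
def Spec_norm_oneTwo (x : Int) (out : Int × Int) : Prop := out = norm_oneTwo_alt x
instance (x : Int) (out : Int × Int) : Decidable (Spec_norm_oneTwo x out) := by unfold Spec_norm_oneTwo; infer_instance

-- ===== CLAIM (what is proved, stated in full; the proofs are below) =====
def Claim_equal_norm_oneTwo : Prop := ∀ (x : Int), Dom_norm_oneTwo x → Spec_norm_oneTwo x (norm_oneTwo x)

-- ===== LEMMAS AND PROOFS =====

-- the loop's bit test at position k agrees with the bits of a Nat m (the low-31-bit image of x)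
def pvBitRel (x : Int) (m : Nat) : Prop :=
  ∀ k : Nat, k < 31 → ((PySem.Int.band ((1 : Int) <<< k) x ≠ 0) ↔ m.testBit k = true)

lemma shiftLeft_one_int (k : Nat) : ((1 : Int) <<< k) = ((2 ^ k : Nat) : Int) := by
  simp [Int.shiftLeft_eq]

lemma log2_unique (m p : Nat) (h1 : 2 ^ p ≤ m) (h2 : m < 2 ^ (p + 1)) : Nat.log2 m = p := by
  have hm : m ≠ 0 := by have := Nat.two_pow_pos p; omega
  have ha := Nat.log2_self_le hm
  have hb := Nat.lt_log2_self (n := m)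
  rcases Nat.lt_or_ge (Nat.log2 m) p with h | h
  · have hpow := Nat.pow_le_pow_right (by norm_num : 1 ≤ 2) (show Nat.log2 m + 1 ≤ p from h)
    omega
  · rcases Nat.eq_or_lt_of_le h with h' | h'
    · omega
    · have hpow := Nat.pow_le_pow_right (by norm_num : 1 ≤ 2) (show p + 1 ≤ Nat.log2 m from h')
      omega

lemma bitRel_nonneg (x : Int) (hx : 0 ≤ x) : pvBitRel x (x.toNat % 2 ^ 31) := by
  intro k hk
  rw [shiftLeft_one_int, PySem.Int.band_of_nonneg (by positivity) hx]
  simp only [Int.toNat_natCast, Nat.and_comm, Nat.and_two_pow, Nat.testBit_mod_two_pow, hk,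
    decide_true, Bool.true_and]
  rcases h : x.toNat.testBit k <;> simp [h]

lemma bitRel_neg (x : Int) (hx : x < 0) (hlb : -(2 ^ 31) ≤ x) :
    pvBitRel x ((x + 2 ^ 31).toNat) := by
  intro k hk
  have hb : ¬ (0 ≤ x) := by omega
  rw [shiftLeft_one_int]
  unfold PySem.Int.band
  rw [if_pos (by positivity), if_neg hb]
  have hn : (-x - 1).toNat = 2 ^ 31 - ((x + 2 ^ 31).toNat + 1) := by omega
  have hm : (x + 2 ^ 31).toNat < 2 ^ 31 := by omega
  rw [hn, Int.toNat_natCast, Nat.and_comm, Nat.and_two_pow,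
    Nat.testBit_two_pow_sub_succ hm]
  simp only [hk, decide_true, Bool.true_and]
  rcases h : (x + 2 ^ 31).toNat.testBit k <;>
    simp [h, Nat.sub_eq_zero_iff_le, (Nat.two_pow_pos k).ne']

-- the scan returns 15 - log2 of the bits still in range, or 0 if none are set
lemma normScanA_spec (x : Int) (m : Nat) (hrel : pvBitRel x m) :
    ∀ j : Nat, j ≤ 31 →
      normScanA x (31 - j) =
        if m % 2 ^ j = 0 then 0 else (15 : Int) - Nat.log2 (m % 2 ^ j) := by
  intro j
  induction j with
  | zero => intro _; rw [normScanA]; simp [Nat.mod_one]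
  | succ j ih =>
    intro hj
    rw [normScanA, dif_pos (by omega)]
    have h30 : 30 - (31 - (j + 1)) = j := by omega
    rw [h30]
    have hsplit : m % 2 ^ (j + 1) = 2 ^ j * (m / 2 ^ j % 2) + m % 2 ^ j := by
      rw [pow_succ, Nat.mod_mul]; ring
    have hp : 0 < 2 ^ j := Nat.two_pow_pos j
    have hlt : m % 2 ^ j < 2 ^ j := Nat.mod_lt _ hp
    by_cases hbt : m.testBit j = true
    · rw [if_pos ((hrel j (by omega)).mpr hbt)]
      have h1 : m / 2 ^ j % 2 = 1 := by
        have ht := Nat.testBit_eq_decide_div_mod_eq (i := j) (x := m)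
        rw [hbt] at ht; simpa using ht.symm
      rw [h1] at hsplit
      have hhi : m % 2 ^ (j + 1) < 2 ^ (j + 1) := Nat.mod_lt _ (Nat.two_pow_pos _)
      rw [if_neg (by omega)]
      have hlog : Nat.log2 (m % 2 ^ (j + 1)) = j := log2_unique _ j (by omega) hhi
      rw [hlog]
      omega
    · rw [if_neg (fun hcon => hbt ((hrel j (by omega)).mp hcon))]
      have hf : m.testBit j = false := by simpa using hbt
      have h0 : m / 2 ^ j % 2 = 0 := by
        have ht := Nat.testBit_eq_decide_div_mod_eq (i := j) (x := m)
        rw [hf] at ht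
        have h2 := Nat.mod_two_eq_zero_or_one (m / 2 ^ j)
        rcases h2 with h2 | h2
        · exact h2
        · exfalso; rw [h2] at ht; simp at ht
      rw [h0] at hsplit
      have hstep : 31 - (j + 1) + 1 = 31 - j := by omega
      rw [hstep, ih (by omega)]
      rw [show m % 2 ^ (j + 1) = m % 2 ^ j by omega]

-- PySem.Int.bitLength of a positive Nat cast is log2 + 1
lemma bitLength_pos_eq (m : Nat) (hm : m ≠ 0) :
    PySem.Int.bitLength ((m : Nat) : Int) = Nat.log2 m + 1 := by
  have h1 := PySem.Int.lt_two_pow_bitLength ((m : Nat) : Int)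
  have h2 := PySem.Int.two_pow_bitLength_le ((m : Nat) : Int) (by exact_mod_cast hm)
  rw [Int.natAbs_natCast] at h1 h2
  set L := PySem.Int.bitLength ((m : Nat) : Int) with hLdef
  have hL : L ≠ 0 := by
    intro h; rw [h] at h1; simp at h1; omega
  have hlog : Nat.log2 m = L - 1 :=
    log2_unique m (L - 1) h2 (by rwa [Nat.sub_add_cancel (by omega)])
  omega

lemma bitRel_of_dom (x : Int) (hdom : -(2 ^ 31) ≤ x) :
    pvBitRel x ((x % (2 ^ 31 : Int)).toNat) := by
  by_cases hx : 0 ≤ x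
  · have hcast : ((x.toNat : Nat) : Int) = x := Int.toNat_of_nonneg hx
    have heq : x % (2 ^ 31 : Int) = ((x.toNat % 2 ^ 31 : Nat) : Int) := by
      conv_lhs => rw [← hcast]
      push_cast
      rfl
    rw [heq, Int.toNat_natCast]
    exact bitRel_nonneg x hx
  · have hx' : x < 0 := by omega
    have heq : x % (2 ^ 31 : Int) = x + 2 ^ 31 := by
      have h1 : (x + 2 ^ 31) % (2 ^ 31 : Int) = x % (2 ^ 31 : Int) := by
        simpa using Int.add_mul_emod_self_left (a := x) (b := (2 ^ 31 : Int)) (c := 1)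
      rw [← h1, Int.emod_eq_of_lt (by omega) (by omega)]
    rw [heq]
    exact bitRel_neg x hx' hdom

-- ===== VERDICT (by name: the statement is the Claim_ definition above) =====
theorem norm_oneTwo_spec : Claim_equal_norm_oneTwo := by
  intro x hdom
  have hdom' : -(2 ^ 31) ≤ x ∧ x ≤ 2 ^ 31 := by
    unfold Dom_norm_oneTwo pvDomInt at hdom
    simp at hdom
    constructor <;> [exact_mod_cast hdom.1; exact_mod_cast hdom.2]
  unfold Spec_norm_oneTwo
  simp only [norm_oneTwo, norm_oneTwo_alt]
  set m : Nat := (x % (2 ^ 31 : Int)).toNat with hmdef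
  have hone : ((1 : Int) <<< (31 : Nat)) = (2 : Int) ^ 31 := by
    rw [Int.shiftLeft_eq]; ring
  have hm_eq : ((m : Nat) : Int) = x % (2 ^ 31 : Int) :=
    Int.toNat_of_nonneg (Int.emod_nonneg x (by norm_num))
  have hmod : PySem.Int.mod x ((1 : Int) <<< (31 : Nat)) = ((m : Nat) : Int) := by
    rw [hone, PySem.Int.mod_eq_emod_of_pos (by norm_num), hm_eq]
  have hmlt : m < 2 ^ 31 := by
    have := Int.emod_lt_of_pos x (b := (2 ^ 31 : Int)) (by norm_num)
    have h0 := Int.emod_nonneg x (show (2 ^ 31 : Int) ≠ 0 by norm_num)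
    omega
  have hrel := bitRel_of_dom x hdom'.1
  have hscan := normScanA_spec x m hrel 31 (le_refl _)
  rw [Nat.sub_self, Nat.mod_eq_of_lt hmlt] at hscan
  rw [hmod, hscan]
  by_cases hm0 : m = 0
  · have hm0' : ((m : Nat) : Int) = 0 := by exact_mod_cast hm0
    rw [if_pos hm0, if_pos hm0']
    norm_num [Int.shiftRight_eq_div_pow]
  · have hm0' : ¬ ((m : Nat) : Int) = 0 := by exact_mod_cast hm0
    rw [if_neg hm0, if_neg hm0', bitLength_pos_eq m hm0]
    set L : Nat := Nat.log2 m with hL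
    rw [show ((L + 1 : Nat) : Int) - 16 = (L : Int) - 15 by push_cast; ring]
    by_cases hc : (15 : Int) - (L : Int) > 0
    · rw [if_pos hc, if_neg (show ¬ ((L : Int) - 15 > 0) by omega),
        show (-((L : Int) - 15)) = 15 - (L : Int) by ring]
      simp only [Prod.mk.injEq]
      exact ⟨trivial, by ring⟩
    · rw [if_neg hc]
      by_cases hc2 : (L : Int) - 15 > 0
      · rw [if_pos hc2, show (-(15 - (L : Int))) = (L : Int) - 15 by ring]
      · rw [if_neg hc2]
        have hL15 : (L : Int) = 15 := by omega
        rw [hL15]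
        norm_num [Int.shiftRight_eq_div_pow, Int.shiftLeft_eq]
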